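-- pv_equiv track=rewrite | github.com/pypi-data/pypi-mirror-354 | packages/CNSistent/cnsistent-0.8.0-py3-none-any.whl/cns/process/segments.py | get_consecutive_segs
-- ===== SOURCE A (Python) =====
-- def get_consecutive_segs(segs):
--     """
--     Groups consecutive segments for each chromosome.
--
--     Parameters
--     ----------
--     segs : list of tuples
--         List of segments for a chromosome.
--
--     Returns
--     -------
--     list of lists
--         List of lists of consecutive segments.
--     """
--     if len(segs) == 0:
--         return []
--     res = []
--     last_end = segs[0][1]
--     res.append([segs[0]])
--     for seg in segs[1:]:
--         if seg[0] == last_end: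
--             res[-1].append(seg)
--         else:
--             res.append([seg])
--         last_end = seg[1]
--     return res
-- ===== SOURCE B (Python) =====
-- def get_consecutive_segs(segs):
--     n = len(segs)
--     if n == 0:
--         return []
--     cuts = [0]
--     for i in range(1, n):
--         if segs[i][0] != segs[i - 1][1]:
--             cuts.append(i)
--     cuts.append(n)
--     return [segs[a:b] for a, b in zip(cuts, cuts[1:])]
-- ===== Notes on version B (the rewrite author's own statement) =====
-- stated objective: alternative
-- what changed: Two-phase decomposition: first collect all cut positions (indices where a segment's start differs from its predecessor's end), then build the groups by slicing the input between consecutive cut positions, instead of growing the last group element by element with a running last_end.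
import Mathlib
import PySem

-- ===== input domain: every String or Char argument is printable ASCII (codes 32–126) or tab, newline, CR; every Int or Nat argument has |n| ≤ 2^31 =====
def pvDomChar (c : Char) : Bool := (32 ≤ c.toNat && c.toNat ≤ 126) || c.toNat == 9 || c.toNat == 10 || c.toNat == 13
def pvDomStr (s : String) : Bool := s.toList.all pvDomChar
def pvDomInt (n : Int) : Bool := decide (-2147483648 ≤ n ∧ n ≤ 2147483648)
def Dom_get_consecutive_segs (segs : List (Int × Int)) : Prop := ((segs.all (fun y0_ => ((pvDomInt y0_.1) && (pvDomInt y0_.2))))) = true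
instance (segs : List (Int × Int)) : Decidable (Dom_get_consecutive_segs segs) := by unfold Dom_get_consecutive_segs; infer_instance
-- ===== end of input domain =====

-- B re-implements the grouping in two phases (collect all cut positions, then slice the list
-- between consecutive cut positions) instead of A's single pass that grows the last group in
-- place with a running last_end; same return value, proved below.

-- ===== PORT A =====
def get_consecutive_segs (segs : List (Int × Int)) : List (List (Int × Int)) :=
  if segs.length = 0 then [] else
    -- last_end = segs[0][1]; res = [[segs[0]]]; loop over segs[1:]
    let s0 := PySem.List.pyGetD segs 0 ((0 : Int), (0 : Int))
    let st := (PySem.List.slice segs (some 1) none).foldl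
      (fun (st : List (List (Int × Int)) × Int) seg =>
        if seg.1 = st.2 then (st.1.dropLast ++ [st.1.getLastD [] ++ [seg]], seg.2)
        else (st.1 ++ [[seg]], seg.2))
      ([[s0]], s0.2)
    st.1

-- ===== PORT B =====
def get_consecutive_segs_alt (segs : List (Int × Int)) : List (List (Int × Int)) :=
  let n : Int := segs.length
  if n = 0 then [] else
    -- phase 1: cuts = [0] + [i in range(1,n) | segs[i][0] != segs[i-1][1]] + [n]
    let cuts := (PySem.List.pyRange 1 n 1).foldl
      (fun cuts i =>
        if (PySem.List.pyGetD segs i ((0 : Int), (0 : Int))).1 ≠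
           (PySem.List.pyGetD segs (i - 1) ((0 : Int), (0 : Int))).2
        then cuts ++ [i] else cuts) [(0 : Int)]
    let cuts := cuts ++ [n]
    -- phase 2: [segs[a:b] for a, b in zip(cuts, cuts[1:])]
    (cuts.zip cuts.tail).map (fun ab => PySem.List.slice segs (some ab.1) (some ab.2))

-- ===== PRECONDITION & SPEC =====
def Spec_get_consecutive_segs (segs : List (Int × Int)) (out : List (List (Int × Int))) : Prop := out = get_consecutive_segs_alt segs
instance (segs : List (Int × Int)) (out : List (List (Int × Int))) : Decidable (Spec_get_consecutive_segs segs out) := by unfold Spec_get_consecutive_segs; infer_instance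

-- ===== CLAIM (what is proved, stated in full; the proofs are below) =====
def Claim_equal_get_consecutive_segs : Prop := ∀ (segs : List (Int × Int)), Dom_get_consecutive_segs segs → Spec_get_consecutive_segs segs (get_consecutive_segs segs)

-- ===== LEMMAS AND PROOFS =====

-- reference grouping: pvAttach g e l = the groups, g being the open group and e the previous end
def pvAttach (g : List (Int × Int)) (e : Int) : List (Int × Int) → List (List (Int × Int))
  | [] => [g]
  | x :: xs => if x.1 = e then pvAttach (g ++ [x]) x.2 xs else g :: pvAttach [x] x.2 xs

-- 0-based positions in l whose segment starts a new group (e = end of the preceding segment)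
def pvBrk (e : Int) : List (Int × Int) → List Nat
  | [] => []
  | x :: xs => (if x.1 ≠ e then [(0 : Nat)] else []) ++ (pvBrk x.2 xs).map (· + 1)

-- partition l by slicing between consecutive cut positions
def pvChop (l : List (Int × Int)) (cuts : List Nat) : List (List (Int × Int)) :=
  (cuts.zip cuts.tail).map (fun ab => (l.drop ab.1).take (ab.2 - ab.1))

-- A's loop, run from state (res ++ [g], e), yields res followed by the groups of pvAttach
lemma foldlA (l : List (Int × Int)) :
    ∀ (res : List (List (Int × Int))) (g : List (Int × Int)) (e : Int),
    (l.foldl (fun (st : List (List (Int × Int)) × Int) seg =>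
        if seg.1 = st.2 then (st.1.dropLast ++ [st.1.getLastD [] ++ [seg]], seg.2)
        else (st.1 ++ [[seg]], seg.2)) (res ++ [g], e)).1 = res ++ pvAttach g e l := by
  induction l with
  | nil => intro res g e; simp [pvAttach]
  | cons x xs ih =>
      intro res g e
      simp only [List.foldl_cons]
      by_cases h : x.1 = e
      · simp only [h, if_true, List.dropLast_concat, List.getLastD_concat,
          pvAttach]
        exact ih res (g ++ [x]) x.2
      · simp only [h, if_false, pvAttach]
        rw [show res ++ [g] ++ [[x]] = (res ++ [g]) ++ [[x]] from rfl, ih (res ++ [g]) [x] x.2]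
        simp

lemma A_eq_attach (x : Int × Int) (xs : List (Int × Int)) :
    get_consecutive_segs (x :: xs) = pvAttach [x] x.2 xs := by
  unfold get_consecutive_segs
  simp only [List.length_cons, PySem.List.slice_from_one, List.tail_cons,
    PySem.List.pyGetD_zero_cons, if_neg (by omega : ¬ (xs.length + 1 = 0))]
  have := foldlA xs [] [x] x.2
  simpa using this

-- the indices B's phase 1 keeps are exactly the break positions pvBrk (shifted by one)
lemma rangeFilter : ∀ (xs : List (Int × Int)) (x : Int × Int),
    (List.range xs.length).filter
      (fun k => decide (((x :: xs).getD (1 + k) ((0 : Int), (0 : Int))).1 ≠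
         ((x :: xs).getD k ((0 : Int), (0 : Int))).2)) = pvBrk x.2 xs := by
  intro xs
  induction xs with
  | nil => intro x; simp [pvBrk]
  | cons y ys ih =>
      intro x
      rw [List.length_cons, List.range_succ_eq_map]
      rw [List.filter_cons, List.filter_map]
      have hmap : ∀ k : Nat,
          ((x :: y :: ys).getD (1 + (k + 1)) ((0:Int),(0:Int))) = ((y :: ys).getD (1 + k) ((0:Int),(0:Int))) := by
        intro k
        have : 1 + (k + 1) = (1 + k) + 1 := by omega
        rw [this]; rfl
      have hcomp : ((fun k => decide (((x :: y :: ys).getD (1 + k) ((0:Int),(0:Int))).1 ≠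
             ((x :: y :: ys).getD k ((0:Int),(0:Int))).2)) ∘ Nat.succ)
           = (fun k => decide (((y :: ys).getD (1 + k) ((0:Int),(0:Int))).1 ≠
             ((y :: ys).getD k ((0:Int),(0:Int))).2)) := by
        funext k
        simp only [Function.comp, Nat.succ_eq_add_one, hmap k]
        rfl
      rw [hcomp, ih y]
      by_cases hb : y.1 = x.2
      · simp [pvBrk, hb]
      · simp [pvBrk, hb]

-- chopping a shifted cut list over a prefixed list drops the prefix
lemma chop_shift (m pre : List (Int × Int)) (cuts : List Nat) :
    pvChop (pre ++ m) (cuts.map (· + pre.length)) = pvChop m cuts := by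
  unfold pvChop
  rw [← List.map_tail, List.zip_map, List.map_map]
  refine List.map_congr_left ?_
  rintro ⟨a, b⟩ hmem
  simp only [Function.comp, Prod.map]
  rw [List.drop_append]
  have h1 : List.drop (a + pre.length) pre = [] := List.drop_eq_nil_of_le (by omega)
  have h2 : a + pre.length - pre.length = a := by omega
  have h3 : b + pre.length - (a + pre.length) = b - a := by omega
  rw [h1, h2, h3, List.nil_append]

-- slicing between the cut positions produces exactly the groups of pvAttach
lemma chop_attach : ∀ (l pre : List (Int × Int)) (e : Int),
    pvChop (pre ++ l) ((0 : Nat) :: (pvBrk e l).map (· + pre.length) ++ [pre.length + l.length]) =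
      pvAttach pre e l := by
  intro l
  induction l with
  | nil =>
      intro pre e
      simp [pvChop, pvBrk, pvAttach]
  | cons x xs ih =>
      intro pre e
      by_cases h : x.1 = e
      · have hbrk : pvBrk e (x :: xs) = (pvBrk x.2 xs).map (· + 1) := by
          simp [pvBrk, h]
        rw [hbrk, List.map_map]
        have hfun : ((· + pre.length) ∘ (· + 1) : Nat → Nat) = (· + (pre ++ [x]).length) := by
          funext k; simp; omega
        have hlen : pre.length + (x :: xs).length = (pre ++ [x]).length + xs.length := by
          simp; omega
        have happ : pre ++ x :: xs = (pre ++ [x]) ++ xs := by simp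
        rw [hfun, hlen, happ, ih (pre ++ [x]) x.2]
        simp [pvAttach, h]
      · have hbrk : pvBrk e (x :: xs) = (0 : Nat) :: (pvBrk x.2 xs).map (· + 1) := by
          simp [pvBrk, h]
        rw [hbrk]
        simp only [List.map_cons, Nat.zero_add, List.cons_append]
        have hchop : ∀ (cs : List Nat),
            pvChop (pre ++ x :: xs) ((0:Nat) :: pre.length :: cs) =
              pre :: pvChop (pre ++ x :: xs) (pre.length :: cs) := by
          intro cs
          simp [pvChop, List.take_left']
        rw [hchop]
        have hibx := ih [x] x.2
        simp only [List.length_singleton, List.singleton_append] at hibx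
        rw [show pvAttach pre e (x :: xs) = pre :: pvAttach [x] x.2 xs from by
          rw [pvAttach]; simp [h]]
        congr 1
        rw [← hibx, ← chop_shift (x :: xs) pre]
        congr 1
        simp only [List.map_cons, List.map_append, List.map_map, List.map_nil, List.length_cons]
        refine congrArg₂ _ (by omega) (congrArg₂ _ ?_ ?_)
        · exact List.map_congr_left (fun k _ => rfl)
        · congr 1; omega

-- cast-to-Int slicing of a Nat cut list is pvChop
lemma sliceChop (segs : List (Int × Int)) (cutsN : List Nat) :
    (((cutsN.map (fun k : Nat => (k : Int))).zip (cutsN.map (fun k : Nat => (k : Int))).tail).map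
      (fun ab => PySem.List.slice segs (some ab.1) (some ab.2))) = pvChop segs cutsN := by
  unfold pvChop
  rw [← List.map_tail, List.zip_map, List.map_map]
  refine List.map_congr_left ?_
  rintro ⟨a, b⟩ hmem
  simp only [Function.comp, Prod.map, PySem.List.slice_natCast]

lemma B_eq_chop (x : Int × Int) (xs : List (Int × Int)) :
    get_consecutive_segs_alt (x :: xs) =
      pvChop (x :: xs) ((0 : Nat) :: (pvBrk x.2 xs).map (· + 1) ++ [1 + xs.length]) := by
  unfold get_consecutive_segs_alt
  simp only [List.length_cons]
  rw [if_neg (by push_cast; omega)]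
  rw [PySem.List.foldl_append_ite_eq_filter]
  rw [PySem.List.pyRange_one]
  have hlen : ((((xs.length + 1 : Nat) : Int)) - 1).toNat = xs.length := by omega
  rw [hlen, List.filter_map]
  have hpred : ((fun i : Int => decide ((PySem.List.pyGetD (x :: xs) i ((0:Int),(0:Int))).1 ≠
        (PySem.List.pyGetD (x :: xs) (i - 1) ((0:Int),(0:Int))).2)) ∘ (fun k : Nat => 1 + (k : Int)))
      = (fun k : Nat => decide (((x :: xs).getD (1 + k) ((0 : Int), (0 : Int))).1 ≠
         ((x :: xs).getD k ((0 : Int), (0 : Int))).2)) := by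
    funext k
    have h1 : (1 : Int) + (k : Nat) = ((1 + k : Nat) : Int) := by omega
    have h2 : (1 : Int) + (k : Nat) - 1 = ((k : Nat) : Int) := by omega
    simp only [Function.comp]
    simp only [h2]
    simp only [h1]
    simp only [PySem.List.pyGetD_natCast]
  rw [hpred, rangeFilter xs x]
  have hcast : [(0 : Int)] ++ ((pvBrk x.2 xs).map fun k : Nat => 1 + (k : Int)) ++ [((xs.length + 1 : Nat) : Int)]
      = (((0 : Nat) :: (pvBrk x.2 xs).map (· + 1) ++ [1 + xs.length]).map (fun k : Nat => (k : Int))) := by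
    simp only [List.map_cons, List.map_append, List.map_map, List.map_nil, Nat.cast_zero,
      List.cons_append]
    congr 1
    congr 1
    · exact List.map_congr_left (fun k _ => by simp [Function.comp]; omega)
    · congr 1; omega
  rw [hcast, sliceChop]

-- ===== VERDICT (by name: the statement is the Claim_ definition above) =====
theorem get_consecutive_segs_spec : Claim_equal_get_consecutive_segs := by
  intro segs _
  unfold Spec_get_consecutive_segs
  cases segs with
  | nil => rfl
  | cons x xs =>
      rw [A_eq_attach, B_eq_chop]
      have := chop_attach xs [x] x.2
      simpa using this.symm
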